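-- pv_equiv track=rewrite | github.com/jurayev/algorithms-practice | amazon/redshift_task1.py | solution
-- ===== SOURCE A (Python) =====
-- def solution(X, Y, A):
--     N = len(A)
--     result = -1
--     nX = 0
--     nY = 0
--     for i in range(N):
--         if A[i] == X:
--             nX += 1
--         elif A[i] == Y:
--             nY += 1
--         if nX == 1 and nY == 1:
--             result = i
--     #if nY + nX == 2:
--     #    return N
--     return result
-- ===== SOURCE B (Python) =====
-- def _note(first, second, i):
--     """Record index i as the first or second occurrence position."""
--     if first is None:
--         return i, second
--     if second is None:
--         return first, i
--     return first, second
--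
--
-- def solution(X, Y, A):
--     # One pass collecting first/second occurrence positions, then a closed form.
--     # An element counts as a Y occurrence only if it is not equal to X (the elif).
--     fx = sx = fy = sy = None
--     for i, a in enumerate(A):
--         if a == X:
--             fx, sx = _note(fx, sx, i)
--         elif a == Y:
--             fy, sy = _note(fy, sy, i)
--     if fx is None or fy is None:
--         return -1
--     n = len(A)
--     hi = min(sx if sx is not None else n, sy if sy is not None else n) - 1
--     return hi if hi >= max(fx, fy) else -1
-- ===== Notes on version B (the rewrite author's own statement) =====
-- stated objective: alternative
-- what changed: Replaces the running-count loop with a single scan that records the first and second occurrence positions of X and of Y (Y only where the element is not X, mirroring the elif), followed by a closed-form answer min(secondX, secondY) - 1 guarded by max(firstX, firstY).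
import Mathlib
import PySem

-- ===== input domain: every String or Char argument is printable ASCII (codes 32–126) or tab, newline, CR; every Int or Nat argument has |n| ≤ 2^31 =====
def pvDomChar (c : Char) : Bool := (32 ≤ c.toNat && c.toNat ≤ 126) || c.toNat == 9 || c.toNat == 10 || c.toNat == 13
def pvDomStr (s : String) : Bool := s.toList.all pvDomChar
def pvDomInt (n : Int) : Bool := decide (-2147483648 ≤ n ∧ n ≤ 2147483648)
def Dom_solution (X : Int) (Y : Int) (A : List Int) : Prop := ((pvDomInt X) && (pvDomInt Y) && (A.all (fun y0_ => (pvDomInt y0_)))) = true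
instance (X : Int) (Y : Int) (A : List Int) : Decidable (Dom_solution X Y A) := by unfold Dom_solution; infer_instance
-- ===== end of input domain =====

-- B replaces A's running-count loop by a first/second-occurrence-positions scan plus a closed-form answer; same return value, proved for all inputs.

-- ===== PORT A =====
-- literal port of A's for-loop: running state (result, nX, nY), index i
def solutionLoop (X Y : Int) : List Int → Int → Int → Int → Int → Int
  | [], _, result, _, _ => result
  | a :: l, i, result, nX, nY =>
    let nX' := if a = X then nX + 1 else nX
    let nY' := if a ≠ X ∧ a = Y then nY + 1 else nY   -- elif: only when a ≠ X
    let result' := if nX' = 1 ∧ nY' = 1 then i else result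
    solutionLoop X Y l (i + 1) result' nX' nY'

def solution (X : Int) (Y : Int) (A : List Int) : Int :=
  solutionLoop X Y A 0 (-1) 0 0

-- ===== PORT B =====
-- port of Source B's _note: record index i as the first or second occurrence position
def notePos (first second : Option Int) (i : Int) : Option Int × Option Int :=
  match first, second with
  | none, _ => (some i, second)
  | some m, none => (some m, some i)
  | some m, some m' => (some m, some m')

-- the scan: first/second occurrence index of X, and of Y among elements ≠ X
def scanPos (X Y : Int) : List Int → Int → Option Int → Option Int → Option Int → Option Int →
    Option Int × Option Int × Option Int × Option Int
  | [], _, fx, sx, fy, sy => (fx, sx, fy, sy)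
  | a :: l, i, fx, sx, fy, sy =>
    if a = X then
      scanPos X Y l (i + 1) (notePos fx sx i).1 (notePos fx sx i).2 fy sy
    else if a = Y then
      scanPos X Y l (i + 1) fx sx (notePos fy sy i).1 (notePos fy sy i).2
    else
      scanPos X Y l (i + 1) fx sx fy sy

-- the closed form: min of the seconds (defaulting to n) minus 1, if it reaches max of the firsts
def finishPos (n : Int) : Option Int × Option Int × Option Int × Option Int → Int
  | (some i, sx, some j, sy) =>
    let hi := min (sx.getD n) (sy.getD n) - 1
    if max i j ≤ hi then hi else -1
  | _ => -1

def solution_alt (X : Int) (Y : Int) (A : List Int) : Int :=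
  finishPos (A.length : Int) (scanPos X Y A 0 none none none none)

-- ===== PRECONDITION & SPEC =====
def Spec_solution (X : Int) (Y : Int) (A : List Int) (out : Int) : Prop := out = solution_alt X Y A
instance (X : Int) (Y : Int) (A : List Int) (out : Int) : Decidable (Spec_solution X Y A out) := by unfold Spec_solution; infer_instance

-- ===== CLAIM (what is proved, stated in full; the proofs are below) =====
def Claim_equal_solution : Prop := ∀ (X : Int) (Y : Int) (A : List Int), Dom_solution X Y A → Spec_solution X Y A (solution X Y A)

-- ===== LEMMAS AND PROOFS =====

-- notePos transports the count/shape invariant one step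
lemma note_inv (first second : Option Int) (i n : Int)
    (h1 : first = none → n = 0) (h2 : first ≠ none → second = none → n = 1)
    (h3 : second ≠ none → 2 ≤ n) (h4 : second ≠ none → first ≠ none)
    (b1 : ∀ m, first = some m → m < i) (b2 : ∀ m, second = some m → m < i) :
    ((notePos first second i).1 = none → n + 1 = 0) ∧
    ((notePos first second i).1 ≠ none → (notePos first second i).2 = none → n + 1 = 1) ∧
    ((notePos first second i).2 ≠ none → 2 ≤ n + 1) ∧
    ((notePos first second i).2 ≠ none → (notePos first second i).1 ≠ none) ∧
    (∀ m, (notePos first second i).1 = some m → m < i + 1) ∧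
    (∀ m, (notePos first second i).2 = some m → m < i + 1) := by
  rcases first with _ | m <;> rcases second with _ | m' <;> simp_all [notePos] <;> omega

-- step lemma, a = X branch
lemma keyX (i : Int) (fx sx fy sy : Option Int)
    (h4 : sx ≠ none → fx ≠ none)
    (b1 : ∀ m, fx = some m → m < i) (b2 : ∀ m, sx = some m → m < i)
    (b3 : ∀ m, fy = some m → m < i) (b4 : ∀ m, sy = some m → m < i) :
    finishPos (i + 1) ((notePos fx sx i).1, (notePos fx sx i).2, fy, sy)
      = if fx = none ∧ fy ≠ none ∧ sy = none then i else finishPos i (fx, sx, fy, sy) := by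
  rcases fx with _ | mfx <;> rcases sx with _ | msx <;> rcases fy with _ | mfy <;> rcases sy with _ | msy <;>
    simp_all [notePos, finishPos] <;> intros <;> (try split_ifs) <;> omega

-- step lemma, a = Y (and a ≠ X) branch
lemma keyY (i : Int) (fx sx fy sy : Option Int)
    (g4 : sy ≠ none → fy ≠ none)
    (b1 : ∀ m, fx = some m → m < i) (b2 : ∀ m, sx = some m → m < i)
    (b3 : ∀ m, fy = some m → m < i) (b4 : ∀ m, sy = some m → m < i) :
    finishPos (i + 1) (fx, sx, (notePos fy sy i).1, (notePos fy sy i).2)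
      = if (fx ≠ none ∧ sx = none) ∧ fy = none then i else finishPos i (fx, sx, fy, sy) := by
  rcases fx with _ | mfx <;> rcases sx with _ | msx <;> rcases fy with _ | mfy <;> rcases sy with _ | msy <;>
    simp_all [notePos, finishPos] <;> intros <;> (try split_ifs) <;> omega

-- step lemma, neither branch
lemma keyN (i : Int) (fx sx fy sy : Option Int)
    (b1 : ∀ m, fx = some m → m < i) (b2 : ∀ m, sx = some m → m < i)
    (b3 : ∀ m, fy = some m → m < i) (b4 : ∀ m, sy = some m → m < i) :
    finishPos (i + 1) (fx, sx, fy, sy)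
      = if (fx ≠ none ∧ sx = none) ∧ (fy ≠ none ∧ sy = none) then i else finishPos i (fx, sx, fy, sy) := by
  rcases fx with _ | mfx <;> rcases sx with _ | msx <;> rcases fy with _ | mfy <;> rcases sy with _ | msy <;>
    simp_all [finishPos] <;> intros <;> (try split_ifs) <;> omega


-- the loop's count condition, expressed in option shapes
lemma ceq_lemma (fx sx fy sy : Option Int) (nX nY : Int)
    (h1 : fx = none → nX = 0) (h2 : fx ≠ none → sx = none → nX = 1) (h3 : sx ≠ none → 2 ≤ nX)
    (h4 : sx ≠ none → fx ≠ none)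
    (g1 : fy = none → nY = 0) (g2 : fy ≠ none → sy = none → nY = 1) (g3 : sy ≠ none → 2 ≤ nY)
    (g4 : sy ≠ none → fy ≠ none) :
    ((nX + 1 = 1 ∧ nY = 1) ↔ (fx = none ∧ fy ≠ none ∧ sy = none)) ∧
    ((nX = 1 ∧ nY + 1 = 1) ↔ ((fx ≠ none ∧ sx = none) ∧ fy = none)) ∧
    ((nX = 1 ∧ nY = 1) ↔ ((fx ≠ none ∧ sx = none) ∧ (fy ≠ none ∧ sy = none))) := by
  rcases fx with _ | mfx <;> rcases sx with _ | msx <;>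
    rcases fy with _ | mfy <;> rcases sy with _ | msy <;> simp_all <;> omega

-- A's running result after any prefix equals B's closed form on that prefix
lemma loop_eq_scan (X Y : Int) : ∀ (l : List Int) (i : Int) (fx sx fy sy : Option Int) (nX nY : Int),
    (fx = none → nX = 0) → (fx ≠ none → sx = none → nX = 1) → (sx ≠ none → 2 ≤ nX) →
    (sx ≠ none → fx ≠ none) →
    (fy = none → nY = 0) → (fy ≠ none → sy = none → nY = 1) → (sy ≠ none → 2 ≤ nY) →
    (sy ≠ none → fy ≠ none) →
    (∀ m, fx = some m → m < i) → (∀ m, sx = some m → m < i) →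
    (∀ m, fy = some m → m < i) → (∀ m, sy = some m → m < i) →
    solutionLoop X Y l i (finishPos i (fx, sx, fy, sy)) nX nY
      = finishPos (i + (l.length : Int)) (scanPos X Y l i fx sx fy sy) := by
  intro l
  induction l with
  | nil =>
    intro i fx sx fy sy nX nY _ _ _ _ _ _ _ _ _ _ _ _
    simp [solutionLoop, scanPos]
  | cons a l ih =>
    intro i fx sx fy sy nX nY h1 h2 h3 h4 g1 g2 g3 g4 b1 b2 b3 b4
    simp only [solutionLoop, scanPos]
    by_cases haX : a = X
    · simp only [if_pos haX, if_neg (show ¬(a ≠ X ∧ a = Y) by simp [haX])]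
      obtain ⟨n1, n2, n3, n4, n5, n6⟩ := note_inv fx sx i nX h1 h2 h3 h4 b1 b2
      have ceq := (ceq_lemma fx sx fy sy nX nY h1 h2 h3 h4 g1 g2 g3 g4).1
      have hr : (if nX + 1 = 1 ∧ nY = 1 then i else finishPos i (fx, sx, fy, sy))
          = finishPos (i + 1) ((notePos fx sx i).1, (notePos fx sx i).2, fy, sy) := by
        rw [keyX i fx sx fy sy h4 b1 b2 b3 b4]
        exact if_congr ceq rfl rfl
      rw [hr, ih (i + 1) _ _ fy sy (nX + 1) nY n1 n2 n3 n4 g1 g2 g3 g4 n5 n6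
        (fun m hm => by have := b3 m hm; omega) (fun m hm => by have := b4 m hm; omega)]
      congr 1
      simp only [List.length_cons]
      push_cast
      ring
    · by_cases haY : a = Y
      · simp only [if_neg haX, if_pos haY, if_pos (show a ≠ X ∧ a = Y from ⟨haX, haY⟩)]
        obtain ⟨n1, n2, n3, n4, n5, n6⟩ := note_inv fy sy i nY g1 g2 g3 g4 b3 b4
        have ceq := (ceq_lemma fx sx fy sy nX nY h1 h2 h3 h4 g1 g2 g3 g4).2.1
        have hr : (if nX = 1 ∧ nY + 1 = 1 then i else finishPos i (fx, sx, fy, sy))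
            = finishPos (i + 1) (fx, sx, (notePos fy sy i).1, (notePos fy sy i).2) := by
          rw [keyY i fx sx fy sy g4 b1 b2 b3 b4]
          exact if_congr ceq rfl rfl
        rw [hr, ih (i + 1) fx sx _ _ nX (nY + 1) h1 h2 h3 h4 n1 n2 n3 n4
          (fun m hm => by have := b1 m hm; omega) (fun m hm => by have := b2 m hm; omega) n5 n6]
        congr 1
        simp only [List.length_cons]
        push_cast
        ring
      · simp only [if_neg haX, if_neg haY, if_neg (show ¬(a ≠ X ∧ a = Y) by simp [haY])]
        have ceq := (ceq_lemma fx sx fy sy nX nY h1 h2 h3 h4 g1 g2 g3 g4).2.2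
        have hr : (if nX = 1 ∧ nY = 1 then i else finishPos i (fx, sx, fy, sy))
            = finishPos (i + 1) (fx, sx, fy, sy) := by
          rw [keyN i fx sx fy sy b1 b2 b3 b4]
          exact if_congr ceq rfl rfl
        rw [hr, ih (i + 1) fx sx fy sy nX nY h1 h2 h3 h4 g1 g2 g3 g4
          (fun m hm => by have := b1 m hm; omega) (fun m hm => by have := b2 m hm; omega)
          (fun m hm => by have := b3 m hm; omega) (fun m hm => by have := b4 m hm; omega)]
        congr 1
        simp only [List.length_cons]
        push_cast
        ring

-- ===== VERDICT (by name: the statement is the Claim_ definition above) =====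
theorem solution_spec : Claim_equal_solution := by
  intro X Y A _
  unfold Spec_solution solution solution_alt
  have h := loop_eq_scan X Y A 0 none none none none 0 0
    (fun _ => rfl) (fun h _ => absurd rfl h) (fun h => absurd rfl h) (fun h => absurd rfl h)
    (fun _ => rfl) (fun h _ => absurd rfl h) (fun h => absurd rfl h) (fun h => absurd rfl h)
    (fun m hm => by cases hm) (fun m hm => by cases hm)
    (fun m hm => by cases hm) (fun m hm => by cases hm)
  simpa [finishPos] using h
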